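-- pv_equiv track=rewrite | github.com/robbiefordyce/windwords | src/python/windwords/handlers/youtube.py | decompose_srt
-- ===== SOURCE A (Python) =====
-- def decompose_srt(srt):
--     """ Given text in raw srt format, decomposes the file into its frames,
--         timcodes and captions.
--
--     Args:
--         srt (str): Raw srt text
--     Returns:
--         Tuple(List[int], List[Tuple[str]], List[str]): A tuple of:
--             - Frames (int)
--             - Timecodes (tuple of (start, end) times)
--             - Captions (str)
--     """
--     lines = srt.split("\n")
--     frames = lines[::4]
--     timecodes = lines[1::4]
--     captions = lines[2::4]
--     spaces = lines[3::4]
--     # Asserts that every third line is an empty string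
--     # This indicates a split between this caption and the next!
--     assert not any(spaces), "Unsupported srt structure provided!"
--     # Do some processing to extract the start and end timecodes
--     times = [t.split("-->") for t in timecodes]
--     return (
--         frames,
--         [(start.strip(), end.strip()) for start, end in times],
--         captions,
--     )
-- ===== SOURCE B (Python) =====
-- def decompose_srt(srt):
--     """Single pass over the lines in chunks of four instead of four strided
--     slices plus two follow-up comprehensions; timecodes are parsed inline."""
--     lines = srt.split("\n")
--     frames, times, captions = [], [], []
--     while lines:
--         head, lines = lines[:4], lines[4:]
--         frames.append(head[0])
--         if len(head) > 1:
--             start, end = head[1].split("-->")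
--             times.append((start.strip(), end.strip()))
--         if len(head) > 2:
--             captions.append(head[2])
--         if len(head) > 3:
--             assert head[3] == "", "Unsupported srt structure provided!"
--     return (frames, times, captions)
-- ===== Notes on version B (the rewrite author's own statement) =====
-- stated objective: alternative
-- what changed: Replaces the four strided slices lines[k::4] followed by two list comprehensions with one pass over the lines in chunks of four that appends the frame, parses the timecode inline and checks the separator line as it goes.
-- outside the precondition, e.g. on decompose_srt('1\na-->b\ncap\nX'): A raises AssertionError, B raises AssertionError; on decompose_srt('1\nnosep\ncap\n'): A raises ValueError, B raises ValueError
import Mathlib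
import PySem

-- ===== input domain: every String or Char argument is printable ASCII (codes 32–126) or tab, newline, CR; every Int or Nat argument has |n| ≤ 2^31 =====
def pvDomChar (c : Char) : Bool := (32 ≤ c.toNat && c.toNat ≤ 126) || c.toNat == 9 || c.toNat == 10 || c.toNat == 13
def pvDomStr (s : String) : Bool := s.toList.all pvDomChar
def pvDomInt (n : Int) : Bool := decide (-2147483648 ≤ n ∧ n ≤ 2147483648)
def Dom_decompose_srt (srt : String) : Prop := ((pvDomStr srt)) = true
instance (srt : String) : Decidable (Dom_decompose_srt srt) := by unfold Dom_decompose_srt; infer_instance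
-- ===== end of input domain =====

-- B replaces A's four strided slices + follow-up comprehensions by one pass over
-- the lines in chunks of four (objective: alternative decomposition, same cost).

-- ===== PORT A =====
-- parse one "start-->end" timecode line; the `_` branch is unreachable under
-- Pre_ (Python raises ValueError there when unpacking `start, end`)
def pvParseTc (parts : List String) : String × String :=
  match parts with
  | [s, e] => (PySem.Str.strip s, PySem.Str.strip e)
  | _ => ("", "")

def decompose_srt (srt : String) : List String × (List (String × String)) × List String :=
  let lines := (PySem.Str.split? srt "\n").getD []          -- srt.split("\n"); "\n" ≠ "" so never none
  let frames := (PySem.List.slice? lines none none 4).getD []      -- lines[::4]; step ≠ 0 so never none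
  let timecodes := (PySem.List.slice? lines (some 1) none 4).getD []  -- lines[1::4]
  let captions := (PySem.List.slice? lines (some 2) none 4).getD []   -- lines[2::4]
  -- lines[3::4] and `assert not any(spaces)`: Pre_ guarantees the assert passes
  let times := timecodes.map (fun t => (PySem.Str.split? t "-->").getD [])
  (frames, times.map pvParseTc, captions)

-- ===== PORT B =====
-- Source B's while-loop over chunks of four, as structural recursion on the lines
def pvAltGo : List String → List String × (List (String × String)) × List String
  | [] => ([], [], [])
  | [a] => ([a], [], [])
  | [a, b] => ([a], [pvParseTc ((PySem.Str.split? b "-->").getD [])], [])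
  | [a, b, c] => ([a], [pvParseTc ((PySem.Str.split? b "-->").getD [])], [c])
  | a :: b :: c :: _ :: rest =>                     -- 4th line only asserted empty; Pre_ guarantees it
    let r := pvAltGo rest
    (a :: r.1, pvParseTc ((PySem.Str.split? b "-->").getD []) :: r.2.1, c :: r.2.2)

def decompose_srt_alt (srt : String) : List String × (List (String × String)) × List String :=
  pvAltGo ((PySem.Str.split? srt "\n").getD [])

-- ===== PRECONDITION & SPEC =====
-- Pre_ excludes exactly the inputs on which Python A raises: a line at index ≡ 3 (mod 4)
-- that is non-empty (AssertionError) or a line at index ≡ 1 (mod 4) that does not split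
-- on "-->" into exactly two pieces (ValueError when unpacking `start, end`).
def Pre_decompose_srt (srt : String) : Prop :=
  ∀ p ∈ ((PySem.Str.split? srt "\n").getD []).zipIdx,
    (p.2 % 4 = 3 → p.1 = "") ∧
    (p.2 % 4 = 1 → ((PySem.Str.split? p.1 "-->").getD []).length = 2)
instance (srt : String) : Decidable (Pre_decompose_srt srt) := by
  unfold Pre_decompose_srt; infer_instance

def pvWitness_decompose_srt : String := "1\n00:01 --> 00:02\nhello"

def Spec_decompose_srt (srt : String) (out : List String × (List (String × String)) × List String) : Prop := out = decompose_srt_alt srt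
instance (srt : String) (out : List String × (List (String × String)) × List String) : Decidable (Spec_decompose_srt srt out) := by unfold Spec_decompose_srt; infer_instance

-- ===== CLAIM (what is proved, stated in full; the proofs are below) =====
def Claim_equal_decompose_srt : Prop := ∀ (srt : String), Dom_decompose_srt srt → Pre_decompose_srt srt → Spec_decompose_srt srt (decompose_srt srt)

-- ===== LEMMAS AND PROOFS =====

-- every4 xs k = xs[k::4] for k ≤ 3, defined structurally (countdown then reset to 3)
def pvEvery4 {α : Type} : List α → Nat → List α
  | [], _ => []
  | x :: xs, 0 => x :: pvEvery4 xs 3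
  | _ :: xs, k + 1 => pvEvery4 xs k

def pvCnt (n k : Nat) : Nat := if k < n then (n - k + 3) / 4 else 0

lemma pvEvery4_eq_filterMap {α : Type} (xs : List α) (k : Nat) (hk : k ≤ 3) :
    (List.range (pvCnt xs.length k)).filterMap (fun j => xs[(k + 4 * j)]?) = pvEvery4 xs k := by
  induction xs generalizing k with
  | nil => simp [pvEvery4]
  | cons x xs ih =>
    match k with
    | 0 =>
      have hc : pvCnt (x :: xs).length 0 = pvCnt xs.length 3 + 1 := by
        simp only [pvCnt, List.length_cons]
        split_ifs <;> omega
      rw [hc, List.range_succ_eq_map, List.filterMap_cons, List.filterMap_map]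
      simp only [Nat.mul_zero, Nat.add_zero, List.getElem?_cons_zero]
      have : ((fun j => (x :: xs)[(0 + 4 * j)]?) ∘ (fun i => i + 1)) =
          (fun j => xs[(3 + 4 * j)]?) := by
        funext j
        simp only [Function.comp_apply, Nat.zero_add]
        have h4 : 4 * (j + 1) = (3 + 4 * j) + 1 := by ring
        rw [h4, List.getElem?_cons_succ]
      rw [this, ih 3 (by omega)]
      rfl
    | k + 1 =>
      have hc : pvCnt (x :: xs).length (k + 1) = pvCnt xs.length k := by
        simp only [pvCnt, List.length_cons]
        split_ifs <;> omega
      rw [hc]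
      have : (fun j => (x :: xs)[(k + 1 + 4 * j)]?) = (fun j => xs[(k + 4 * j)]?) := by
        funext j
        have h : k + 1 + 4 * j = (k + 4 * j) + 1 := by ring
        rw [h, List.getElem?_cons_succ]
      rw [this, ih k (by omega)]
      rfl

-- bridge: the slice? primitive at start k ≤ 3, step 4 is exactly the filterMap form
lemma pvSlice?_some {α : Type} (xs : List α) (k : Nat) (hk : k ≤ 3) :
    PySem.List.slice? xs (some (k : Int)) none 4 =
      some ((List.range (pvCnt xs.length k)).filterMap (fun j => xs[(k + 4 * j)]?)) := by
  simp only [PySem.List.slice?, PySem.List.sliceIndices]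
  norm_num
  have hc : (if (if (k:Int) < 0 then max ((k:Int) + (xs.length:Int)) 0 else min (k:Int) (xs.length:Int)) < (xs.length:Int) then
          ((((xs.length:Int) - if (k:Int) < 0 then max ((k:Int) + (xs.length:Int)) 0 else min (k:Int) (xs.length:Int)) + 4 - 1) / 4).toNat
        else 0) = pvCnt xs.length k := by
    unfold pvCnt; split_ifs <;> omega
  rw [hc]
  apply List.filterMap_congr
  intro j hj
  simp only [List.mem_range] at hj; unfold pvCnt at hj
  have hkn : k < xs.length := by by_contra h; rw [if_neg (by omega)] at hj; omega
  congr 1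
  omega

lemma pvSlice?_none {α : Type} (xs : List α) :
    PySem.List.slice? xs none none 4 = PySem.List.slice? xs (some 0) none 4 := by
  simp only [PySem.List.slice?, PySem.List.sliceIndices]
  norm_num

-- xs[k::4] as computed by the port equals the structural pvEvery4
lemma pvStride {α : Type} (xs : List α) (k : Nat) (hk : k ≤ 3) :
    (PySem.List.slice? xs (some (k : Int)) none 4).getD [] = pvEvery4 xs k := by
  rw [pvSlice?_some xs k hk, Option.getD_some, pvEvery4_eq_filterMap xs k hk]

-- one line of B parsing: split on "-->" then strip both halves
def pvParseLine (t : String) : String × String :=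
  pvParseTc ((PySem.Str.split? t "-->").getD [])

lemma pvAltGo_eq (xs : List String) :
    pvAltGo xs = (pvEvery4 xs 0, (pvEvery4 xs 1).map pvParseLine, pvEvery4 xs 2) := by
  induction xs using pvAltGo.induct with
  | case1 => simp [pvAltGo, pvEvery4]
  | case2 a => simp [pvAltGo, pvEvery4]
  | case3 a b => simp [pvAltGo, pvEvery4, pvParseLine]
  | case4 a b c => simp [pvAltGo, pvEvery4, pvParseLine]
  | case5 a b c d rest ih => simp [pvAltGo, pvEvery4, pvParseLine, ih]

lemma pvStrideN {α : Type} (xs : List α) (k : Int) (hk : 0 ≤ k) (hk3 : k ≤ 3) :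
    (PySem.List.slice? xs (some k) none 4).getD [] = pvEvery4 xs k.toNat := by
  have := pvStride xs k.toNat (by omega)
  rwa [Int.toNat_of_nonneg hk] at this

-- ===== VERDICT (by name: the statement is the Claim_ definition above) =====
theorem decompose_srt_spec : Claim_equal_decompose_srt := by
  intro srt _hdom _hpre
  unfold Spec_decompose_srt
  simp only [decompose_srt, decompose_srt_alt]
  rw [pvAltGo_eq]
  rw [pvSlice?_none, pvStrideN _ 0 (by omega) (by omega), pvStrideN _ 1 (by omega) (by omega),
    pvStrideN _ 2 (by omega) (by omega), List.map_map]
  rfl
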